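-- pv_equiv track=rewrite | github.com/pypi-data/pypi-mirror-322 | packages/nnViewer/nnviewer-0.1.3.tar.gz/nnviewer-0.1.3/nnViewer/front/maps.py | map_strings_to_colors
-- ===== SOURCE A (Python) =====
-- def map_strings_to_colors(strings):
--     colors = [
--         "#186B66",
--         "#B97A6A",
--         "#66014A",
--         "#085D8F",
--         "#065D6F",
--         "#7C3F40",
--         "#3C5B5C",
--         "#D26D7E",
--         "#4A2B73",
--         "#4a536b",
--     ]
--
--
--     i = 0
--     while len(colors) < len(strings):
--         colors.append(colors[i])
--         i += 1
--
--     return {string: colors[i] for i, string in enumerate(strings)}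
-- ===== SOURCE B (Python) =====
-- def map_strings_to_colors(strings):
--     palette = [
--         "#186B66",
--         "#B97A6A",
--         "#66014A",
--         "#085D8F",
--         "#065D6F",
--         "#7C3F40",
--         "#3C5B5C",
--         "#D26D7E",
--         "#4A2B73",
--         "#4a536b",
--     ]
--     return {s: palette[i % len(palette)] for i, s in enumerate(strings)}
-- ===== Notes on version B (the rewrite author's own statement) =====
-- stated objective: simpler
-- what changed: Replaces the while loop that pads the color list to length n (then indexes the padded list) with direct modular indexing into the fixed 10-color palette, eliminating the table-building pass and the auxiliary O(n) list.
import Mathlib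
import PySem

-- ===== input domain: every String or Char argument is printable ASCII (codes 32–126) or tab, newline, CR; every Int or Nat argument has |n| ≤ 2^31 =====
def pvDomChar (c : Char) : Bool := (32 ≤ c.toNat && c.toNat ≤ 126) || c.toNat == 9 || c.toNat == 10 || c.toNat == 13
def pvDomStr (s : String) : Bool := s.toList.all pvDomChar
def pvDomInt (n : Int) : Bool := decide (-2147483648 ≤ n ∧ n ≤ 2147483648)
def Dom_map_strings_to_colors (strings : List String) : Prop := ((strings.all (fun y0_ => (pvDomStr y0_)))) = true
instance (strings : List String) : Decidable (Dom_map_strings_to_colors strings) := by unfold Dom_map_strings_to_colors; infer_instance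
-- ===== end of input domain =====

-- B replaces A's while-loop that pads the color list to length n with direct modular indexing
-- into the fixed 10-color palette (objective: simpler; equal return value proved below).


-- ===== PORT A =====
-- the literal palette A starts from
def pvPalette : List String :=
  ["#186B66", "#B97A6A", "#66014A", "#085D8F", "#065D6F",
   "#7C3F40", "#3C5B5C", "#D26D7E", "#4A2B73", "#4a536b"]

-- `while len(colors) < len(strings): colors.append(colors[i]); i += 1`
-- (colors[i] is always in range here, so pyGetD with default "" is exact)
def pvPad (colors : List String) (n : Nat) (i : Int) : List String :=
  if colors.length < n then
    pvPad (colors ++ [PySem.List.pyGetD colors i ""]) n (i + 1) else colors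
termination_by n - colors.length
decreasing_by simp; omega

def map_strings_to_colors (strings : List String) : List (String × String) :=
  let colors := pvPad pvPalette strings.length 0
  ((PySem.List.enumerate strings 0).foldl
    (fun d p => d.insert p.2 (PySem.List.pyGetD colors p.1 ""))
    (PySem.Dict.empty : PySem.Dict String String)).items

-- ===== PORT B =====
def map_strings_to_colors_alt (strings : List String) : List (String × String) :=
  ((PySem.List.enumerate strings 0).foldl
    (fun d p => d.insert p.2 (PySem.List.pyGetD pvPalette (PySem.Int.mod p.1 (pvPalette.length : Int)) ""))
    (PySem.Dict.empty : PySem.Dict String String)).items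

-- ===== PRECONDITION & SPEC =====
def Spec_map_strings_to_colors (strings : List String) (out : List (String × String)) : Prop := out = map_strings_to_colors_alt strings
instance (strings : List String) (out : List (String × String)) : Decidable (Spec_map_strings_to_colors strings out) := by unfold Spec_map_strings_to_colors; infer_instance

-- ===== CLAIM (what is proved, stated in full; the proofs are below) =====
def Claim_equal_map_strings_to_colors : Prop := ∀ (strings : List String), Dom_map_strings_to_colors strings → Spec_map_strings_to_colors strings (map_strings_to_colors strings)

-- ===== LEMMAS AND PROOFS =====

-- the cyclic list of length m : [palette[0%10], palette[1%10], …]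
def pvCyc (m : Nat) : List String := (List.range m).map (fun k => pvPalette.getD (k % 10) "")

lemma pvCyc_ten : pvCyc 10 = pvPalette := by decide

lemma pvGet_cyc (m i : Nat) (h : i < m) :
    PySem.List.pyGetD (pvCyc m) (i : Int) "" = pvPalette.getD (i % 10) "" := by
  rw [PySem.List.pyGetD_natCast, pvCyc, PySem.List.getD_map_range _ _ _ _ h]

lemma pvCyc_step (m : Nat) (h : 10 ≤ m) :
    pvCyc m ++ [PySem.List.pyGetD (pvCyc m) ((m : Int) - 10) ""] = pvCyc (m + 1) := by
  have h1 : ((m : Int) - 10) = ((m - 10 : Nat) : Int) := by omega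
  have h2 : (m - 10) % 10 = m % 10 := by omega
  rw [h1, pvGet_cyc m (m - 10) (by omega), h2]
  simp [pvCyc, List.range_succ]

lemma pvPad_cyc (n : Nat) : ∀ (f m : Nat), n - m = f → 10 ≤ m →
    pvPad (pvCyc m) n ((m : Int) - 10) = pvCyc (max m n) := by
  intro f
  induction f with
  | zero =>
    intro m hf hm
    rw [pvPad]
    have hlen : (pvCyc m).length = m := by simp [pvCyc]
    rw [if_neg (by omega)]
    have : max m n = m := by omega
    rw [this]
  | succ f ih =>
    intro m hf hm
    rw [pvPad]
    have hlen : (pvCyc m).length = m := by simp [pvCyc]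
    rw [if_pos (by omega), pvCyc_step m hm]
    have harg : ((m : Int) - 10) + 1 = ((m + 1 : Nat) : Int) - 10 := by push_cast; ring
    rw [harg, ih (m + 1) (by omega) (by omega)]
    have : max (m + 1) n = max m n := by omega
    rw [this]

lemma pvColors_eq (n : Nat) :
    pvPad pvPalette n 0 = pvCyc (max 10 n) := by
  have h0 : ((10 : Nat) : Int) - 10 = 0 := by norm_num
  rw [← pvCyc_ten, ← h0, pvPad_cyc n (n - 10) 10 rfl (le_refl 10)]

-- ===== VERDICT (by name: the statement is the Claim_ definition above) =====
theorem map_strings_to_colors_spec : Claim_equal_map_strings_to_colors := by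
  intro strings _
  unfold Spec_map_strings_to_colors map_strings_to_colors map_strings_to_colors_alt
  rw [pvColors_eq]
  simp only []
  congr 1
  apply PySem.List.foldl_congr_mem
  intro acc p hp
  rw [PySem.List.mem_enumerate_iff] at hp
  obtain ⟨k, hk, rfl⟩ := hp
  simp only [zero_add]
  rw [pvGet_cyc (max 10 strings.length) k (by omega)]
  simp [pvPalette]
  have hc : ((k : Int) % 10) = ((k % 10 : Nat) : Int) := by omega
  rw [hc, PySem.List.pyGetD_natCast]
  simp [List.getD]
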